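-- pv_equiv track=rewrite | github.com/Jnslavendel/binary-graphical-modelling-using-lasso | graphical_modelling.py | generaliseNeigbourhoodsToCategories
-- ===== SOURCE A (Python) =====
-- def generaliseNeigbourhoodsToCategories(neighbourhoods):
--     """
--     Generalises neighbourhoods through transforming dummy variables back to categories, based on variable name
--
--     Parameters:
--     neighbourhoods (dict): Dictionary of neighbourhoods for each variable.
--
--     Returns:
--     dict: Generalized neighbourhoods by categories.
--     """
--
--     def get_category(variable):
--         # Define robust way to extract categories by splitting by underscores
--         parts = variable.split('_')
--         return parts[0] if parts else variable
--
--     category_neighbourhoods = {}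
--
--     # Initialise categories
--     for variable in neighbourhoods:
--         category = get_category(variable)
--         if category not in category_neighbourhoods:
--             category_neighbourhoods[category] = set()
--
--     # Collect neighbours for each category
--     for variable, neighbours in neighbourhoods.items():
--         variable_category = get_category(variable)
--         for neighbour in neighbours:
--             neighbour_category = get_category(neighbour)
--             if variable_category != neighbour_category:
--                 category_neighbourhoods[variable_category].add(neighbour_category)
--
--     return category_neighbourhoods
-- ===== SOURCE B (Python) =====
-- def generaliseNeigbourhoodsToCategories(neighbourhoods):
--     """Per-category re-scan: compute the first-seen-distinct category list,
--     then build each category's neighbour-category set by one comprehension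
--     over the whole input; no mutable dict of sets is maintained."""
--
--     def get_category(variable):
--         parts = variable.split('_')
--         return parts[0] if parts else variable
--
--     categories = list(dict.fromkeys(get_category(v) for v in neighbourhoods))
--     return {cat: {get_category(n)
--                   for v, ns in neighbourhoods.items() if get_category(v) == cat
--                   for n in ns
--                   if get_category(n) != cat}
--             for cat in categories}
-- ===== Notes on version B (the rewrite author's own statement) =====
-- stated objective: alternative
-- what changed: A makes two passes maintaining a mutable dict of sets updated in place per edge; B maintains no dict at all: it first computes the first-seen-distinct category list, then builds each category's value independently by a comprehension that re-scans the whole input filtered to that category.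
import Mathlib
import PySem

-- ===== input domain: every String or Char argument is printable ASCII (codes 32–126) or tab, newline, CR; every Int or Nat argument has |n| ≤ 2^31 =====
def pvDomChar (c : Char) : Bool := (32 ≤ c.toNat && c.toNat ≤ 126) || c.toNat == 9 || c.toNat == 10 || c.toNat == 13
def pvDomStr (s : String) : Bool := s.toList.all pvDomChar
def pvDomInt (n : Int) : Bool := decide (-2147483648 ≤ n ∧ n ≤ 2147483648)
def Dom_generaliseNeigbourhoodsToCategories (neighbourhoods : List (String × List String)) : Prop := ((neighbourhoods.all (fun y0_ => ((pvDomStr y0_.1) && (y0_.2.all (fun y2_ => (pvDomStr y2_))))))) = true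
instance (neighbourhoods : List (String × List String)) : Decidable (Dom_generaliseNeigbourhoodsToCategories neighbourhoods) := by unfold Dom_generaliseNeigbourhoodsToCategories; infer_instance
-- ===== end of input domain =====

-- B keeps no mutable dict of sets: it lists the distinct categories first-seen and builds each
-- category's set by its own filtered re-scan of the whole input (objective: alternative).

-- ===== PORT A =====
-- get_category: variable.split('_'), parts[0] if parts else variable
def pvCategoryA (v : String) : String :=
  match PySem.Str.split? v "_" with
  | some (p :: _) => p
  | some [] => v
  | none => v  -- unreachable: the separator "_" is non-empty, so split? never returns none

def generaliseNeigbourhoodsToCategories (neighbourhoods : List (String × List String)) : List (String × List String) :=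
  -- first pass: initialise an empty set for every category
  let init : PySem.Dict String (PySem.Set String) :=
    neighbourhoods.foldl
      (fun d kv =>
        if d.contains (pvCategoryA kv.1) then d
        else d.insert (pvCategoryA kv.1) PySem.Set.empty)
      PySem.Dict.empty
  -- second pass: collect neighbour categories; the `[variable_category].add` is rendered by
  -- Dict.modify with default ∅ — the key is always present (initialised in the first pass), so no KeyError arises
  let final : PySem.Dict String (PySem.Set String) :=
    neighbourhoods.foldl
      (fun d kv =>
        kv.2.foldl
          (fun d n =>
            if pvCategoryA kv.1 ≠ pvCategoryA n then
              d.modify (pvCategoryA kv.1) PySem.Set.empty (fun s => PySem.Set.add s (pvCategoryA n))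
            else d)
          d)
      init
  final.items

-- ===== PORT B =====
-- B's own get_category (same text as A's helper, as in Source B)
def pvCategoryB (v : String) : String :=
  match PySem.Str.split? v "_" with
  | some (p :: _) => p
  | some [] => v
  | none => v  -- unreachable: the separator "_" is non-empty

def generaliseNeigbourhoodsToCategories_alt (neighbourhoods : List (String × List String)) : List (String × List String) :=
  -- categories = list(dict.fromkeys(get_category(v) for v in neighbourhoods))
  let cats : List String := PySem.Set.ofList (neighbourhoods.map (fun kv => pvCategoryB kv.1))
  -- dict comprehension over distinct cats = map; each value is its own filtered re-scan
  cats.map (fun c =>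
    (c,
      neighbourhoods.foldl
        (fun s kv =>
          if pvCategoryB kv.1 == c then
            kv.2.foldl
              (fun s n => if pvCategoryB n ≠ c then PySem.Set.add s (pvCategoryB n) else s) s
          else s)
        PySem.Set.empty))

-- ===== PRECONDITION & SPEC =====
def Spec_generaliseNeigbourhoodsToCategories (neighbourhoods : List (String × List String)) (out : List (String × List String)) : Prop := out = generaliseNeigbourhoodsToCategories_alt neighbourhoods
instance (neighbourhoods : List (String × List String)) (out : List (String × List String)) : Decidable (Spec_generaliseNeigbourhoodsToCategories neighbourhoods out) := by unfold Spec_generaliseNeigbourhoodsToCategories; infer_instance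

-- ===== CLAIM (what is proved, stated in full; the proofs are below) =====
def Claim_equal_generaliseNeigbourhoodsToCategories : Prop := ∀ (neighbourhoods : List (String × List String)), Dom_generaliseNeigbourhoodsToCategories neighbourhoods → Spec_generaliseNeigbourhoodsToCategories neighbourhoods (generaliseNeigbourhoodsToCategories neighbourhoods)

-- ===== LEMMAS AND PROOFS =====

theorem pvCategoryB_eq : pvCategoryB = pvCategoryA := rfl

-- abbreviations used only by the proofs
def pvKey (kv : String × List String) : String := pvCategoryA kv.1

def pvStep (c : String) (s : PySem.Set String) (n : String) : PySem.Set String :=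
  if c ≠ pvCategoryA n then PySem.Set.add s (pvCategoryA n) else s

def pvGrp (c : String) (l : List (String × List String)) : List (List String) :=
  (l.filter (fun kv => pvKey kv == c)).map Prod.snd

-- ---- generic facts about "functional" dicts  mk (cs.map (fun c => (c, F c))) ----

theorem pv_get?_mk_map {ν : Type} (cs : List String) (F : String → ν) (k : String) :
    (PySem.Dict.mk (cs.map (fun c => (c, F c)))).get? k
      = if k ∈ cs then some (F k) else none := by
  induction cs with
  | nil => simp [PySem.Dict.get?]
  | cons c cs ih =>
      by_cases h : c = k
      · subst h; simp [PySem.Dict.get?_mk_cons]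
      · simp [PySem.Dict.get?_mk_cons, h, ih, Ne.symm h]

theorem pv_contains_mk_map {ν : Type} (cs : List String) (F : String → ν) (k : String) :
    (PySem.Dict.mk (cs.map (fun c => (c, F c)))).contains k = decide (k ∈ cs) := by
  induction cs with
  | nil => simp [PySem.Dict.contains]
  | cons c cs ih =>
      simp only [PySem.Dict.contains, List.map_cons, List.any_cons] at ih ⊢
      by_cases h : c = k
      · subst h; simp
      · simp [h, Ne.symm h, ih, List.mem_cons]

theorem pv_insert_mk_map_mem {ν : Type} (cs : List String) (F : String → ν) (k : String)
    (v : ν) (h : k ∈ cs) :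
    (PySem.Dict.mk (cs.map (fun c => (c, F c)))).insert k v
      = PySem.Dict.mk (cs.map (fun c => (c, if c = k then v else F c))) := by
  simp [PySem.Dict.insert, h, List.map_map]
  intro c _
  by_cases hc : c = k
  · subst hc; simp
  · simp [hc]

theorem pv_insert_mk_map_new {ν : Type} (cs : List String) (F : String → ν) (k : String)
    (v : ν) (h : k ∉ cs) :
    (PySem.Dict.mk (cs.map (fun c => (c, F c)))).insert k v
      = PySem.Dict.mk ((cs ++ [k]).map (fun c => (c, if c = k then v else F c))) := by
  simp [PySem.Dict.insert, h]
  intro c hc e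
  exact absurd (e ▸ hc) h

theorem pv_ofList_append (xs : List String) (x : String) :
    PySem.Set.ofList (xs ++ [x])
      = if x ∈ xs then PySem.Set.ofList xs else PySem.Set.ofList xs ++ [x] := by
  rw [PySem.Set.ofList_eq_foldl, List.foldl_append, ← PySem.Set.ofList_eq_foldl]
  by_cases h : x ∈ xs
  · have : x ∈ PySem.Set.ofList xs := (PySem.Set.mem_ofList xs x).mpr h
    simp [PySem.Set.add, PySem.Set.contains, this, h]
  · have : x ∉ PySem.Set.ofList xs := fun hx => h ((PySem.Set.mem_ofList xs x).mp hx)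
    simp [PySem.Set.add, PySem.Set.contains, this, h]

theorem pvGrp_append (c : String) (l : List (String × List String)) (kv : String × List String) :
    pvGrp c (l ++ [kv]) = if pvKey kv = c then pvGrp c l ++ [kv.2] else pvGrp c l := by
  by_cases h : pvKey kv = c <;> simp [pvGrp, List.filter_append, h]

-- ---- characterisation of A's two passes ----

theorem pvA_init (l : List (String × List String)) :
    l.foldl
      (fun d kv =>
        if d.contains (pvCategoryA kv.1) then d
        else d.insert (pvCategoryA kv.1) PySem.Set.empty)
      PySem.Dict.empty
    = PySem.Dict.mk ((PySem.Set.ofList (l.map pvKey)).map (fun c => (c, ([] : PySem.Set String)))) := by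
  induction l using List.reverseRecOn with
  | nil => rfl
  | append_singleton l kv ih =>
      rw [List.foldl_append, List.foldl_cons, List.foldl_nil, ih]
      have hkey : pvCategoryA kv.1 = pvKey kv := rfl
      rw [hkey]
      simp only [List.map_append, List.map_cons, List.map_nil]
      rw [pv_ofList_append]
      by_cases hm : pvKey kv ∈ l.map pvKey
      · have hcs : pvKey kv ∈ PySem.Set.ofList (l.map pvKey) :=
          (PySem.Set.mem_ofList _ _).mpr hm
        rw [if_pos hm, pv_contains_mk_map, if_pos (decide_eq_true hcs)]
      · have hcs : pvKey kv ∉ PySem.Set.ofList (l.map pvKey) :=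
          fun hx => hm ((PySem.Set.mem_ofList _ _).mp hx)
        rw [if_neg hm, pv_contains_mk_map]
        rw [if_neg (by simp [hcs])]
        rw [pv_insert_mk_map_new _ _ _ _ hcs]
        congr 1
        simp [PySem.Set.empty]

theorem pvA_inner (ns : List String) (cs : List String) (F : String → PySem.Set String)
    (k : String) (h : k ∈ cs) :
    ns.foldl
      (fun d n =>
        if k ≠ pvCategoryA n then
          d.modify k PySem.Set.empty (fun s => PySem.Set.add s (pvCategoryA n))
        else d)
      (PySem.Dict.mk (cs.map (fun c => (c, F c))))
    = PySem.Dict.mk (cs.map (fun c => (c, if c = k then ns.foldl (pvStep k) (F k) else F c))) := by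
  induction ns generalizing F with
  | nil =>
      simp only [List.foldl_nil]
      congr 1
      apply List.map_congr_left
      intro c _
      by_cases hc : c = k
      · subst hc; simp
      · simp [hc]
  | cons n ns ih =>
      simp only [List.foldl_cons]
      by_cases hn : k = pvCategoryA n
      · rw [if_neg (not_not_intro hn), ih F]
        congr 1
        apply List.map_congr_left
        intro c _
        by_cases hc : c = k
        · subst hc
          have hstep : pvStep c (F c) n = F c := by
            simp only [pvStep, if_neg (not_not_intro hn)]
          simp [hstep]
        · simp [hc]
      · rw [if_pos hn]
        have hmod : (PySem.Dict.mk (cs.map (fun c => (c, F c)))).modify k PySem.Set.empty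
              (fun s => PySem.Set.add s (pvCategoryA n))
            = PySem.Dict.mk (cs.map (fun c =>
                (c, if c = k then PySem.Set.add (F k) (pvCategoryA n) else F c))) := by
          simp only [PySem.Dict.modify, PySem.Dict.getD, pv_get?_mk_map, if_pos h,
            Option.getD_some]
          exact pv_insert_mk_map_mem _ _ _ _ h
        rw [hmod, ih _]
        congr 1
        apply List.map_congr_left
        intro c _
        by_cases hc : c = k
        · subst hc
          have hstep : pvStep c (F c) n = PySem.Set.add (F c) (pvCategoryA n) := by
            simp only [pvStep, if_pos hn]
          simp [hstep]
        · simp [hc]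

theorem pvA_pass2 (l : List (String × List String)) (cs : List String)
    (F : String → PySem.Set String) (h : ∀ kv ∈ l, pvKey kv ∈ cs) :
    l.foldl
      (fun d kv =>
        kv.2.foldl
          (fun d n =>
            if pvCategoryA kv.1 ≠ pvCategoryA n then
              d.modify (pvCategoryA kv.1) PySem.Set.empty (fun s => PySem.Set.add s (pvCategoryA n))
            else d)
          d)
      (PySem.Dict.mk (cs.map (fun c => (c, F c))))
    = PySem.Dict.mk (cs.map (fun c =>
        (c, (pvGrp c l).foldl (fun s ns => ns.foldl (pvStep c) s) (F c)))) := by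
  induction l using List.reverseRecOn generalizing F with
  | nil =>
      simp [pvGrp]
  | append_singleton l kv ih =>
      rw [List.foldl_append, List.foldl_cons, List.foldl_nil]
      rw [ih F (fun kv' h' => h kv' (List.mem_append_left _ h'))]
      have hk : pvKey kv ∈ cs := h kv (List.mem_append_right _ (List.mem_singleton_self _))
      have hkey : pvCategoryA kv.1 = pvKey kv := rfl
      rw [hkey, pvA_inner kv.2 cs _ (pvKey kv) hk]
      congr 1
      apply List.map_congr_left
      intro c _
      by_cases hc : c = pvKey kv
      · subst hc
        simp [pvGrp_append, List.foldl_append]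
      · have hck : ¬ pvKey kv = c := fun e => hc e.symm
        simp [hc, pvGrp_append, hck]

-- ---- characterisation of B's per-category re-scan ----

theorem pvStepB_eq (c : String) :
    (fun (s : PySem.Set String) (n : String) =>
        if pvCategoryA n ≠ c then PySem.Set.add s (pvCategoryA n) else s) = pvStep c := by
  funext s n
  by_cases hn : pvCategoryA n = c
  · simp [pvStep, hn]
  · simp [pvStep, hn, Ne.symm hn]

theorem pvB_scan (c : String) (l : List (String × List String)) (s0 : PySem.Set String) :
    l.foldl
      (fun s kv => if pvKey kv == c then kv.2.foldl (pvStep c) s else s) s0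
    = (pvGrp c l).foldl (fun s ns => ns.foldl (pvStep c) s) s0 := by
  induction l generalizing s0 with
  | nil => rfl
  | cons kv l ih =>
      rw [List.foldl_cons, ih]
      by_cases h : pvKey kv = c
      · simp [pvGrp, List.filter_cons, h]
      · simp [pvGrp, List.filter_cons, h]

-- ===== VERDICT (by name: the statement is the Claim_ definition above) =====
theorem generaliseNeigbourhoodsToCategories_spec : Claim_equal_generaliseNeigbourhoodsToCategories := by
  intro l _
  show generaliseNeigbourhoodsToCategories l = generaliseNeigbourhoodsToCategories_alt l
  simp only [generaliseNeigbourhoodsToCategories, generaliseNeigbourhoodsToCategories_alt,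
    pvCategoryB_eq]
  rw [pvA_init,
    pvA_pass2 l _ _ (fun kv hkv =>
      (PySem.Set.mem_ofList _ _).mpr (List.mem_map.mpr ⟨kv, hkv, rfl⟩))]
  show List.map _ _ = List.map _ _
  apply List.map_congr_left
  intro c _
  simp only [pvStepB_eq]
  rw [show (fun (s : PySem.Set String) (kv : String × List String) =>
        if pvCategoryA kv.1 == c then kv.2.foldl (pvStep c) s else s)
      = (fun s kv => if pvKey kv == c then kv.2.foldl (pvStep c) s else s) from rfl,
    pvB_scan]
  simp [PySem.Set.empty]
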